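-- pv_equiv track=rewrite | github.com/moonyeol/algorithm | python/baekjoon_12979.py | way
-- ===== SOURCE A (Python) =====
-- def way(a, b) :
--     if a == b :
--         return 0
--     elif a >= b/2  :
--         return 1
--     elif b%2 ==1 :
--         return 1 + way(a, (b//2)+1)
--     else :
--         return 1 + way(a, b//2)
-- ===== SOURCE B (Python) =====
-- def way(a, b):
--     # Count doublings of a "cap" starting from 2*a until it reaches b,
--     # instead of repeatedly ceil-halving b as A does.
--     if a == b:
--         return 0
--     cap = 2 * a
--     k = 1
--     while cap < b:
--         cap *= 2
--         k += 1
--     return k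
-- ===== Notes on version B (the rewrite author's own statement) =====
-- stated objective: alternative
-- what changed: Instead of A's recursion that repeatedly ceil-halves b adding 1 on each unwind, B doubles a cap starting at 2*a and counts doublings until the cap reaches b (correct because ceil(b/2^k) <= 2a iff b <= 2a*2^k).
import Mathlib
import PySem

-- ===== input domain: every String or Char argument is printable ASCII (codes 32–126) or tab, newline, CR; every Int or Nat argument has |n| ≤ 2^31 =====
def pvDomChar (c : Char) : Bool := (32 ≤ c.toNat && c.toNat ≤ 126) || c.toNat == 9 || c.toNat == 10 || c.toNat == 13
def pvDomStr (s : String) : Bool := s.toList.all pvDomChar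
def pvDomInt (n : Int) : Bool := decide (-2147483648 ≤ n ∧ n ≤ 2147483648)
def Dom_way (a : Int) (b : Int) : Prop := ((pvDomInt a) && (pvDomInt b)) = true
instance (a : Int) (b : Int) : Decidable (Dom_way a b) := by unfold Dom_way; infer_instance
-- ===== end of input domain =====

-- ===== PORT A =====
-- Header: B replaces A's ceil-halving recursion on b by a different algorithm — doubling a
-- cap 2*a until it reaches b — and equality of the return value is proved on Pre_way
-- (A's recursion diverges outside it). Python's float test `a >= b/2` is ported as
-- `b ≤ 2*a`: exact on Dom (|a|,|b| ≤ 2^31, so b/2 is an exact float and the comparison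
-- equals the integer comparison). Fuel 100 only makes the recursion total; inside Pre_way
-- it is never exhausted (at most ~32 steps for |b| ≤ 2^31).
def wayFuel : Nat → Int → Int → Int
  | 0, _, _ => 0
  | n+1, a, b =>
    if a = b then 0
    else if b ≤ 2*a then 1
    else if PySem.Int.mod b 2 = 1 then 1 + wayFuel n a (PySem.Int.floordiv b 2 + 1)
    else 1 + wayFuel n a (PySem.Int.floordiv b 2)

def way (a : Int) (b : Int) : Int := wayFuel 100 a b

-- ===== PORT B =====
-- B's while loop: double `cap` until it reaches b, counting doublings; same fuel guard.
def capLoop : Nat → Int → Int → Int → Int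
  | 0, _, _, k => k
  | n+1, cap, b, k => if cap < b then capLoop n (2*cap) b (k+1) else k

def way_alt (a : Int) (b : Int) : Int :=
  if a = b then 0 else capLoop 100 (2*a) b 1

-- ===== PRECONDITION & SPEC =====
-- Pre_way is exactly the set of inputs where the Python A terminates (returns); elsewhere
-- A recurses forever on a fixed point of b ↦ ceil(b/2) and raises RecursionError.
def Pre_way (a : Int) (b : Int) : Prop :=
  1 ≤ a ∨ (a = 0 ∧ b ≤ 0) ∨ (a < 0 ∧ (b ≤ 2*a ∨ b = a))
instance (a : Int) (b : Int) : Decidable (Pre_way a b) := by unfold Pre_way; infer_instance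
def pvWitness_way : Int × Int := (3, 100)

def Spec_way (a : Int) (b : Int) (out : Int) : Prop := out = way_alt a b
instance (a : Int) (b : Int) (out : Int) : Decidable (Spec_way a b out) := by unfold Spec_way; infer_instance

-- ===== CLAIM (what is proved, stated in full; the proofs are below) =====
def Claim_equal_way : Prop := ∀ (a : Int) (b : Int), Dom_way a b → Pre_way a b → Spec_way a b (way a b)

-- ===== LEMMAS AND PROOFS =====
-- one-step unfold lemmas (safe with literal fuel, where 'simp [wayFuel]' would explode)
theorem wayFuel_succ (n : Nat) (a b : Int) : wayFuel (n+1) a b =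
    (if a = b then 0
     else if b ≤ 2*a then 1
     else if PySem.Int.mod b 2 = 1 then 1 + wayFuel n a (PySem.Int.floordiv b 2 + 1)
     else 1 + wayFuel n a (PySem.Int.floordiv b 2)) := rfl

theorem capLoop_succ (n : Nat) (cap b k : Int) : capLoop (n+1) cap b k =
    (if cap < b then capLoop n (2*cap) b (k+1) else k) := rfl

-- ceil(b/2), the value A recurses on (both branches of A's recursion compute it).
def hstep (b : Int) : Int :=
  if PySem.Int.mod b 2 = 1 then PySem.Int.floordiv b 2 + 1 else PySem.Int.floordiv b 2

theorem hstep_spec (b : Int) : 2 * hstep b = b ∨ 2 * hstep b = b + 1 := by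
  have h := PySem.Int.floordiv_mul_add_mod b 2
  have h2 := PySem.Int.mod_eq_emod_of_pos (a := b) (b := 2) (by omega)
  unfold hstep
  split_ifs with hm <;> omega

-- comparing the doubled cap against b equals comparing the cap against ceil(b/2)
theorem lt_hstep_iff (c b : Int) : c < hstep b ↔ 2*c < b := by
  rcases hstep_spec b with h | h <;> omega

theorem hstep_le (b P : Int) (h : b ≤ 2*P) : hstep b ≤ P := by
  rcases hstep_spec b with h2 | h2 <;> omega

theorem lt_hstep (a b : Int) (h : 2*a < b) : a < hstep b := (lt_hstep_iff a b).mpr h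

-- Doubling the cap is the same as ceil-halving the target.
theorem capLoop_double (n : Nat) : ∀ (c b k : Int),
    capLoop n (2*c) b k = capLoop n c (hstep b) k := by
  induction n with
  | zero => intro c b k; simp [capLoop]
  | succ n ih =>
    intro c b k
    simp only [capLoop]
    by_cases h : 2*c < b
    · rw [if_pos h, if_pos ((lt_hstep_iff c b).mpr h)]
      exact ih (2*c) b (k+1)
    · rw [if_neg h, if_neg (fun hc => h ((lt_hstep_iff c b).mp hc))]

-- Main correspondence: with enough fuel, the cap loop from (2*a, k) computes
-- (k-1) + A's recursive count, for 1 ≤ a, a ≠ b, b ≤ 2*a*2^n.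
theorem capLoop_eq_wayFuel (n : Nat) : ∀ (fn fm : Nat), n ≤ fn → n ≤ fm →
    ∀ (a b k : Int), 1 ≤ a → a ≠ b → b ≤ 2*a*2^n →
    capLoop (fm+1) (2*a) b k = (k-1) + wayFuel (fn+1) a b := by
  induction n with
  | zero =>
    intro fn fm _ _ a b k ha hne hb
    simp only [pow_zero, mul_one] at hb
    simp only [capLoop, wayFuel]
    rw [if_neg (by omega), if_neg hne, if_pos hb]
    ring
  | succ n ih =>
    intro fn fm hfn hfm a b k ha hne hb
    by_cases hble : b ≤ 2*a
    · simp only [capLoop, wayFuel]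
      rw [if_neg (by omega), if_neg hne, if_pos hble]
      ring
    · -- b > 2*a: unfold one step on each side
      obtain ⟨fn', rfl⟩ : ∃ m, fn = m + 1 := ⟨fn - 1, by omega⟩
      obtain ⟨fm', rfl⟩ : ∃ m, fm = m + 1 := ⟨fm - 1, by omega⟩
      have hstep_lt : a < hstep b := lt_hstep a b (by omega)
      have hrec : capLoop (fm'+1+1) (2*a) b k = capLoop (fm'+1) (2*a) (hstep b) (k+1) := by
        simp only [capLoop]
        rw [if_pos (by omega)]
        have := capLoop_double (fm'+1) (2*a) b (k+1)
        rw [show 2*(2*a) = 2*(2*a) by ring] at this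
        exact this
      rw [hrec]
      have hihb : hstep b ≤ 2*a*2^n := by
        apply hstep_le
        have : (2:Int)*a*2^(n+1) = 2*(2*a*2^n) := by ring
        omega
      rw [ih fn' fm' (by omega) (by omega) a (hstep b) (k+1) ha (by omega) hihb]
      -- right side: unfold A one step
      have hA : wayFuel (fn'+1+1) a b = 1 + wayFuel (fn'+1) a (hstep b) := by
        simp only [wayFuel]
        rw [if_neg hne, if_neg (by omega)]
        unfold hstep
        split_ifs <;> rfl
      rw [hA]
      ring

-- ===== VERDICT (by name: the statement is the Claim_ definition above) =====
theorem way_spec : Claim_equal_way := by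
  intro a b hDom hPre
  unfold Spec_way way way_alt
  by_cases heq : a = b
  · rw [if_pos heq, heq, show (100:Nat) = 99+1 from rfl, wayFuel_succ, if_pos rfl]
  · rw [if_neg heq]
    by_cases hble : b ≤ 2*a
    · show wayFuel 100 a b = capLoop 100 (2*a) b 1
      rw [show (100:Nat) = 99+1 from rfl, wayFuel_succ, capLoop_succ,
        if_neg heq, if_pos hble, if_neg (show ¬ 2*a < b by omega)]
    · -- b > 2*a forces 1 ≤ a under Pre_way
      have ha : 1 ≤ a := by
        unfold Pre_way at hPre
        rcases hPre with h | ⟨h1, h2⟩ | ⟨h1, h2 | h2⟩ <;> omega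
      have hb : b ≤ 2*a*2^31 := by
        unfold Dom_way pvDomInt at hDom
        simp only [Bool.and_eq_true, decide_eq_true_eq] at hDom
        have h1 : b ≤ 2147483648 := hDom.2.2
        have h2 : (2:Int)*a*2^31 ≥ 2*2^31 := by nlinarith [pow_pos (show (0:Int) < 2 by norm_num) 31]
        norm_num at h2 ⊢
        omega
      have := capLoop_eq_wayFuel 31 99 99 (by omega) (by omega) a b 1 ha heq hb
      rw [show (99:Nat)+1 = 100 from rfl] at this
      omega
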